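-- pv_equiv track=rewrite | github.com/jasoncoelho/adventOfCode2021 | 11/run.py | setFlashedCellsToZeroAndReturnCount
-- ===== SOURCE A (Python) =====
-- def setFlashedCellsToZeroAndReturnCount(twoDArray):
--     countZeroes = 0
--     for i in range(0,len(twoDArray)):
--        for j in range(0,len(twoDArray[i])):
--             if twoDArray[i][j] == 10: # for flashed - set the cells to zero
--                twoDArray[i][j] = 0
--                countZeroes += 1
--
--     return countZeroes
-- ===== SOURCE B (Python) =====
-- def setFlashedCellsToZeroAndReturnCount(twoDArray):
--     # Pass 1: count the flashed cells.
--     count = sum(row.count(10) for row in twoDArray)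
--     # Pass 2: reset them in place (same mutation as the original).
--     for row in twoDArray:
--         row[:] = [0 if v == 10 else v for v in row]
--     return count
-- ===== Notes on version B (the rewrite author's own statement) =====
-- stated objective: simpler
-- what changed: Replaces the fused index-based count-and-reset nested loop by two separate whole-row passes: a count via sum(row.count(10)) and an in-place reset via slice assignment of a comprehension.
import Mathlib
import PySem

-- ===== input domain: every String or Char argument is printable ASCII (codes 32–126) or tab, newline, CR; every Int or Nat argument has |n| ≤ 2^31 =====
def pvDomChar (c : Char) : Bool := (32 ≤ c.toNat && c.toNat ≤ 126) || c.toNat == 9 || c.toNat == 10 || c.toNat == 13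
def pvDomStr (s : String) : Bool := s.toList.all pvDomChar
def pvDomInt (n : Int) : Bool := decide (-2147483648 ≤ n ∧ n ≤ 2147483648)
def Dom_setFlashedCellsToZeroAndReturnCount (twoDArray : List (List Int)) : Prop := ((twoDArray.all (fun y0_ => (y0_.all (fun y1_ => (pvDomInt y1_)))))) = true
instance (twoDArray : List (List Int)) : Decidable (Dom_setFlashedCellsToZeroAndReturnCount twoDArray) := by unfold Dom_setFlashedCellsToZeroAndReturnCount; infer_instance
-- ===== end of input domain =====

-- B replaces A's fused count-and-reset index loop by two separate passes (count, then reset);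
-- A mutates its argument in place and B performs the same mutation; the theorems are about the return value.

-- ===== PORT A =====
-- inner loop body: 'if twoDArray[i][j] == 10: twoDArray[i][j] = 0; countZeroes += 1'
-- (indices produced by range() are always in range, so xs[i] is ported as pyGetD / List.set)
def pvA_inner (i : Int) (st : List (List Int) × Int) (j : Int) : List (List Int) × Int :=
  let row := PySem.List.pyGetD st.1 i []
  if PySem.List.pyGetD row j 0 = 10 then
    (st.1.set i.toNat (row.set j.toNat 0), st.2 + 1)
  else st

-- outer loop body: 'for j in range(0, len(twoDArray[i])): …'
def pvA_outer (st : List (List Int) × Int) (i : Int) : List (List Int) × Int :=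
  (PySem.List.pyRange 0 (PySem.List.pyGetD st.1 i []).length 1).foldl (pvA_inner i) st

def setFlashedCellsToZeroAndReturnCount (twoDArray : List (List Int)) : Int :=
  ((PySem.List.pyRange 0 twoDArray.length 1).foldl pvA_outer (twoDArray, 0)).2

-- ===== PORT B =====
def setFlashedCellsToZeroAndReturnCount_alt (twoDArray : List (List Int)) : Int :=
  let count : Int := (twoDArray.map (fun row => (PySem.List.count row 10 : Int))).sum
  -- reset pass: 'row[:] = [0 if v == 10 else v for v in row]' mutates in place; it does not affect the return value
  let _reset := twoDArray.map (fun row => row.map (fun v => if v = 10 then 0 else v))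
  count

-- ===== PRECONDITION & SPEC =====
def Spec_setFlashedCellsToZeroAndReturnCount (twoDArray : List (List Int)) (out : Int) : Prop := out = setFlashedCellsToZeroAndReturnCount_alt twoDArray
instance (twoDArray : List (List Int)) (out : Int) : Decidable (Spec_setFlashedCellsToZeroAndReturnCount twoDArray out) := by unfold Spec_setFlashedCellsToZeroAndReturnCount; infer_instance

-- ===== CLAIM (what is proved, stated in full; the proofs are below) =====
def Claim_equal_setFlashedCellsToZeroAndReturnCount : Prop := ∀ (twoDArray : List (List Int)), Dom_setFlashedCellsToZeroAndReturnCount twoDArray → Spec_setFlashedCellsToZeroAndReturnCount twoDArray (setFlashedCellsToZeroAndReturnCount twoDArray)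

-- ===== LEMMAS AND PROOFS =====

-- zr: a row after the reset; its count of 10s is what A adds for that row
def pvZr (row : List Int) : List Int := row.map (fun v => if v = 10 then 0 else v)

lemma pvZr_length (row : List Int) : (pvZr row).length = row.length := by
  simp [pvZr]

-- inner-loop invariant: with row i of arr equal to 'pvZr p ++ t' (prefix already reset),
-- folding the inner body over the remaining indices resets t and adds its count of 10s
lemma pvA_inner_fold (t : List Int) : ∀ (p : List Int) (arr : List (List Int)) (i : Nat)
    (_ : i < arr.length) (_ : arr[i]? = some (pvZr p ++ t)) (c : Int),
    (PySem.List.pyRange (p.length) (p.length + t.length) 1).foldl (pvA_inner i) (arr, c)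
      = (arr.set i (pvZr p ++ pvZr t), c + (t.count 10 : Int)) := by
  induction t with
  | nil =>
    intro p arr i hi harr c
    rw [PySem.List.pyRange_one_eq_nil (by simp)]
    have harr' : arr[i]? = some (pvZr p) := by simpa using harr
    have hself : arr.set i (pvZr p) = arr := by
      apply List.ext_getElem?
      intro n
      by_cases h : n = i
      · subst h; rw [List.getElem?_set_self hi, harr']
      · rw [List.getElem?_set_ne (Ne.symm h)]
    have e : pvZr p ++ pvZr [] = pvZr p := by simp [pvZr]
    rw [List.foldl_nil, e, hself]
    simp
  | cons v t ih =>
    intro p arr i hi harr c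
    have hlt : (p.length : Int) < p.length + (v :: t).length := by
      simp
    rw [PySem.List.pyRange_one_cons hlt]
    rw [List.foldl_cons]
    have hrow : PySem.List.pyGetD arr (i : Int) [] = pvZr p ++ v :: t := by
      rw [PySem.List.pyGetD_natCast]
      simp [List.getD_eq_getElem?_getD, harr]
    have hget : PySem.List.pyGetD (pvZr p ++ v :: t) (p.length : Int) 0 = v := by
      rw [PySem.List.pyGetD_natCast]
      simp [List.getD_eq_getElem?_getD, pvZr_length]
    have hb : ((p.length : Int) + 1) + (t.length : Int)
        = (p.length : Int) + ((v :: t).length : Int) := by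
      push_cast [List.length_cons]; ring
    by_cases hv : v = 10
    · have hstep : pvA_inner (i : Int) (arr, c) (p.length : Int)
          = (arr.set i ((pvZr p ++ v :: t).set p.length 0), c + 1) := by
        unfold pvA_inner
        rw [hrow]
        simp only [Int.toNat_natCast]
        rw [hget]
        simp [hv]
      rw [hstep]
      have hset : (pvZr p ++ v :: t).set p.length 0 = pvZr (p ++ [v]) ++ t := by
        rw [List.set_append_right _ _ (by simp [pvZr_length])]
        simp [pvZr, hv]
      rw [hset]
      have := ih (p ++ [v]) (arr.set i (pvZr (p ++ [v]) ++ t)) i (by simpa using hi)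
        (by simp [List.getElem?_set_self (by simpa using hi)]) (c + 1)
      have hlen : ((p ++ [v]).length : Int) = (p.length : Int) + 1 := by simp
      rw [hlen, hb] at this
      rw [this]
      simp only [List.set_set]
      have h1 : pvZr (p ++ [v]) ++ pvZr t = pvZr p ++ pvZr (v :: t) := by
        simp [pvZr, hv]
      rw [h1]
      have h2 : (List.count 10 (v :: t) : Int) = (List.count 10 t : Int) + 1 := by
        simp [hv]
      rw [h2]; ring_nf
    · have hstep : pvA_inner (i : Int) (arr, c) (p.length : Int) = (arr, c) := by
        unfold pvA_inner
        rw [hrow]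
        simp only [Int.toNat_natCast]
        rw [hget]
        simp [hv]
      rw [hstep]
      have := ih (p ++ [v]) arr i hi
        (by simpa [pvZr, hv] using harr) c
      have hlen : ((p ++ [v]).length : Int) = (p.length : Int) + 1 := by simp
      rw [hlen, hb] at this
      rw [this]
      have h1 : pvZr (p ++ [v]) ++ pvZr t = pvZr p ++ pvZr (v :: t) := by
        simp [pvZr, hv]
      have h2 : (List.count 10 (v :: t) : Int) = (List.count 10 t : Int) := by
        simp [hv]
      rw [h1, h2]

-- outer-loop invariant: with the first q.length rows already processed,
-- folding the outer body over the remaining indices resets t and adds its counts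
lemma pvA_outer_fold (t : List (List Int)) : ∀ (q : List (List Int)) (c : Int),
    (PySem.List.pyRange (q.length) (q.length + t.length) 1).foldl pvA_outer (q ++ t, c)
      = (q ++ t.map pvZr, c + (t.map (fun row => (row.count 10 : Int))).sum) := by
  induction t with
  | nil =>
    intro q c
    rw [PySem.List.pyRange_one_eq_nil (by simp), List.foldl_nil]
    simp
  | cons r t ih =>
    intro q c
    have hlt : (q.length : Int) < q.length + (r :: t).length := by simp
    rw [PySem.List.pyRange_one_cons hlt, List.foldl_cons]
    have hi : q.length < (q ++ r :: t).length := by simp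
    have harr : (q ++ r :: t)[q.length]? = some r := by
      simp
    have hrow : PySem.List.pyGetD (q ++ r :: t) (q.length : Int) [] = r := by
      rw [PySem.List.pyGetD_natCast]; simp [List.getD_eq_getElem?_getD]
    have hstep : pvA_outer (q ++ r :: t, c) (q.length : Int)
        = ((q ++ r :: t).set q.length (pvZr r), c + (r.count 10 : Int)) := by
      show (PySem.List.pyRange 0 (PySem.List.pyGetD (q ++ r :: t) (q.length : Int) []).length 1).foldl
          (pvA_inner q.length) (q ++ r :: t, c) = _
      rw [hrow]
      have := pvA_inner_fold r [] (q ++ r :: t) q.length hi (by simpa [pvZr] using harr) c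
      simpa [pvZr] using this
    rw [hstep]
    have hset : (q ++ r :: t).set q.length (pvZr r) = (q ++ [pvZr r]) ++ t := by
      rw [List.set_append_right _ _ (le_refl q.length)]
      simp
    rw [hset]
    have := ih (q ++ [pvZr r]) (c + (r.count 10 : Int))
    have hlen : ((q ++ [pvZr r]).length : Int) = (q.length : Int) + 1 := by simp
    have hb : ((q.length : Int) + 1) + (t.length : Int)
        = (q.length : Int) + ((r :: t).length : Int) := by
      push_cast [List.length_cons]; ring
    rw [hlen, hb] at this
    rw [this]
    simp [List.append_assoc]
    ring

-- ===== VERDICT (by name: the statement is the Claim_ definition above) =====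
theorem setFlashedCellsToZeroAndReturnCount_spec : Claim_equal_setFlashedCellsToZeroAndReturnCount := by
  intro twoDArray _
  show setFlashedCellsToZeroAndReturnCount twoDArray = setFlashedCellsToZeroAndReturnCount_alt twoDArray
  unfold setFlashedCellsToZeroAndReturnCount setFlashedCellsToZeroAndReturnCount_alt
  have := pvA_outer_fold twoDArray [] 0
  simp only [List.length_nil, List.nil_append, Nat.cast_zero, zero_add] at this
  rw [this]
  simp [PySem.List.count_eq]
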